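-- pv_equiv track=rewrite | github.com/autosome-ru/MixALime | mixalime/export.py | shorten_filenames
-- ===== SOURCE A (Python) =====
-- def shorten_filenames(filenames: list):
--     its = [f.split('/') for f in filenames]
--     i = 0
--     t = None
--     for folders in zip(*its):
--         for t in folders[1:]:
--             if folders[0] != t:
--                 break
--         if t != folders[0]:
--             break
--         i += 1
--     return ['/'.join(t[i:]) for t in its]
-- ===== SOURCE B (Python) =====
-- def shorten_filenames(filenames: list):
--     # Fold a running common-prefix (component list) over the files instead of
--     # scanning columns of zip(*its); fewer than two files: nothing to strip.
--     if len(filenames) < 2: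
--         return list(filenames)
--     its = [f.split('/') for f in filenames]
--     prefix = its[0]
--     for t in its[1:]:
--         k = 0
--         while k < len(prefix) and k < len(t) and prefix[k] == t[k]:
--             k += 1
--         prefix = prefix[:k]
--     i = len(prefix)
--     return ['/'.join(t[i:]) for t in its]
-- ===== Notes on version B (the rewrite author's own statement) =====
-- stated objective: alternative
-- what changed: B folds a running common-prefix component list over the files (pairwise prefix reduction, with a guard returning fewer-than-two filenames unchanged), instead of A's column-wise scan of zip(*its) with a break-on-mismatch inner loop over a stale sentinel t.
import Mathlib
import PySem

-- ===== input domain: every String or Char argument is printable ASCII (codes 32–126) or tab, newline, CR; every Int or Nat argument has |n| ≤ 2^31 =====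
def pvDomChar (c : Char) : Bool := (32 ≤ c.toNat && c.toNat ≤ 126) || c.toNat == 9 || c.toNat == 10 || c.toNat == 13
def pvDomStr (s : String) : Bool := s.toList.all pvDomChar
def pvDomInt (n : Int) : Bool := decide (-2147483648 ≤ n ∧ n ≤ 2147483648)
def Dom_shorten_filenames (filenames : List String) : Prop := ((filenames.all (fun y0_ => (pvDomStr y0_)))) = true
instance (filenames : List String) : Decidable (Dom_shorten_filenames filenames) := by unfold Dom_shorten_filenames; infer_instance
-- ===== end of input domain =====

-- ===== PORT A =====
-- B folds a running common-prefix over the files instead of A's column scan of zip(*its);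
-- same return value on every input (alternative decomposition, no speed claim).

-- f.split('/')  (shared by both Pythons; sep is nonempty, so split? is always some)
def pvSplit (f : String) : List String := (PySem.Str.split? f "/").getD []

-- A's inner loop: 'for t in folders[1:]: if folders[0] != t: break' — returns the final t
def pvInner (h : String) : List String → Option String → Option String
  | [], t => t
  | x :: xs, _ => if h ≠ x then some x else pvInner h xs (some x)

-- zip(*its): columns until the shortest list is exhausted (zip() with no args is empty)
def pvZip (its : List (List String)) : List (List String) :=
  if its.isEmpty || its.any List.isEmpty then []
  else (its.map (fun l => l.headD "")) :: pvZip (its.map List.tail)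
  termination_by (its.headD []).length
  decreasing_by
    rename_i hc
    cases its with
    | nil => simp at hc
    | cons a r =>
      have ha : a ≠ [] := by
        intro h
        exact hc (by simp [h])
      have hl : a.length ≠ 0 := by simpa using ha
      simp only [List.attach_cons, List.map_cons, List.map_map, List.headD_cons,
        List.length_tail]
      omega

-- A's outer loop: break as soon as the stale t disagrees with folders[0], else i += 1
def pvOuter : List (List String) → Nat → Option String → Nat
  | [], i, _ => i
  | col :: rest, i, t =>
    match col with
    | [] => i  -- unreachable: zip(*its) never yields an empty tuple while iterating
    | h :: tl =>
      let t' := pvInner h tl t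
      if t' ≠ some h then i else pvOuter rest (i + 1) t'

def shorten_filenames (filenames : List String) : List String :=
  let its := filenames.map pvSplit
  let i := pvOuter (pvZip its) 0 none
  its.map (fun t => PySem.Str.join "/" (t.drop i))

-- ===== PORT B =====
-- the while-loop + prefix[:k] of Source B: common prefix of two component lists
def pvCp : List String → List String → List String
  | a :: as, b :: bs => if a = b then a :: pvCp as bs else []
  | _, _ => []

def shorten_filenames_alt (filenames : List String) : List String :=
  if filenames.length < 2 then filenames
  else
    match filenames.map pvSplit with
    | [] => []  -- unreachable: length ≥ 2
    | l0 :: rest =>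
      let i := (rest.foldl pvCp l0).length
      (l0 :: rest).map (fun t => PySem.Str.join "/" (t.drop i))

-- ===== PRECONDITION & SPEC =====
def Spec_shorten_filenames (filenames : List String) (out : List String) : Prop := out = shorten_filenames_alt filenames
instance (filenames : List String) (out : List String) : Decidable (Spec_shorten_filenames filenames out) := by unfold Spec_shorten_filenames; infer_instance

-- ===== CLAIM (what is proved, stated in full; the proofs are below) =====
def Claim_equal_shorten_filenames : Prop := ∀ (filenames : List String), Dom_shorten_filenames filenames → Spec_shorten_filenames filenames (shorten_filenames filenames)

-- ===== LEMMAS AND PROOFS =====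

-- ---- the split/join roundtrip:  '/'.join(f.split('/')) == f ----

-- first piece and remaining pieces of splitting on '/'
def pvSplitC : List Char → List Char × List (List Char)
  | [] => ([], [])
  | x :: r =>
    let pr := pvSplitC r
    if x = '/' then ([], pr.1 :: pr.2) else (x :: pr.1, pr.2)

theorem pvSplitC_cons (x : Char) (r : List Char) :
    pvSplitC (x :: r)
      = if x = '/' then ([], (pvSplitC r).1 :: (pvSplitC r).2)
        else (x :: (pvSplitC r).1, (pvSplitC r).2) := rfl

theorem pvGo_eq (fuel : Nat) : ∀ (l cur : List Char) (acc : List (List Char)),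
    l.length < fuel →
    PySem.Chars.splitOn.go ['/'] fuel l cur acc
      = acc.reverse ++ ((cur.reverse ++ (pvSplitC l).1) :: (pvSplitC l).2) := by
  induction fuel with
  | zero => intro l cur acc h; omega
  | succ f ih =>
    intro l cur acc h
    rw [PySem.Chars.splitOn.go.eq_def]
    cases l with
    | nil => simp [pvSplitC]
    | cons x r =>
      simp only []
      by_cases hx : x = '/'
      · have hp : List.isPrefixOf ['/'] (x :: r) = true := by simp [hx]
        simp only [hp, if_true]
        rw [show List.drop (['/'] : List Char).length (x :: r) = r from rfl]
        rw [ih r [] (cur.reverse :: acc) (by simpa using Nat.lt_of_succ_lt_succ h)]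
        rw [pvSplitC_cons, if_pos hx]
        simp
      · have hbx : ('/' == x) = false := by
          simp only [beq_eq_false_iff_ne, ne_eq]
          exact fun hh => hx hh.symm
        have hp : List.isPrefixOf ['/'] (x :: r) = false := by
          rw [show List.isPrefixOf ['/'] (x :: r)
              = (('/' == x) && List.isPrefixOf ([] : List Char) r) from rfl, hbx,
            Bool.false_and]
        simp only [hp, Bool.false_eq_true, if_false]
        rw [ih r (x :: cur) acc (by simpa using Nat.lt_of_succ_lt_succ h)]
        rw [pvSplitC_cons, if_neg hx]
        simp

theorem pvJoin_splitC (l : List Char) :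
    PySem.Chars.join ['/'] ((pvSplitC l).1 :: (pvSplitC l).2) = l := by
  induction l with
  | nil => decide
  | cons x r ih =>
    by_cases hx : x = '/'
    · rw [pvSplitC_cons, if_pos hx]
      show PySem.Chars.join ['/'] ([] :: (pvSplitC r).1 :: (pvSplitC r).2) = x :: r
      rw [PySem.Chars.join_cons_cons]
      simpa [hx] using congrArg (fun t => '/' :: t) ih
    · rw [pvSplitC_cons, if_neg hx]
      show PySem.Chars.join ['/'] ((x :: (pvSplitC r).1) :: (pvSplitC r).2) = x :: r
      cases hps : (pvSplitC r).2 with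
      | nil =>
        rw [hps] at ih
        rw [PySem.Chars.join_singleton] at ih ⊢
        rw [ih]
      | cons q qs =>
        rw [hps] at ih
        rw [PySem.Chars.join_cons_cons] at ih ⊢
        simpa using congrArg (fun t => x :: t) ih

theorem pv_join_split (s : String) : PySem.Str.join "/" (pvSplit s) = s := by
  have hsplit : pvSplit s = (PySem.Chars.splitOn s.toList ['/']).map String.ofList := by
    simp [pvSplit, PySem.Str.split?, PySem.Chars.split?]
  have hgo : PySem.Chars.splitOn s.toList ['/'] = (pvSplitC s.toList).1 :: (pvSplitC s.toList).2 := by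
    have := pvGo_eq (s.toList.length + 1) s.toList [] [] (by omega)
    simpa [PySem.Chars.splitOn] using this
  rw [hsplit, hgo]
  simp only [PySem.Str.join, List.map_map]
  have hmap : (((pvSplitC s.toList).1 :: (pvSplitC s.toList).2).map (String.toList ∘ String.ofList))
      = (pvSplitC s.toList).1 :: (pvSplitC s.toList).2 := by
    simp [Function.comp_def]
  rw [hmap]
  rw [show ("/" : String).toList = ['/'] from rfl]
  rw [pvJoin_splitC]
  simp

-- ---- A's loop: i = number of leading uniform columns ----

def pvLead : List (List String) → Nat
  | [] => 0
  | [] :: _ => 0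
  | (h :: tl) :: rest => if tl.all (· == h) then pvLead rest + 1 else 0

theorem pvInner_cons (h x : String) (xs : List String) (t : Option String) :
    pvInner h (x :: xs) t = if h ≠ x then some x else pvInner h xs (some x) := rfl

theorem pvInner_all (h : String) : ∀ (tl : List String) (t : Option String),
    tl ≠ [] → (∀ x ∈ tl, x = h) → pvInner h tl t = some h := by
  intro tl
  induction tl with
  | nil => intro t ht _; exact absurd rfl ht
  | cons x xs ih =>
    intro t _ hall
    have hx : x = h := hall x (by simp)
    subst hx
    rw [pvInner_cons, if_neg (by simp)]
    cases xs with
    | nil => rfl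
    | cons y ys => exact ih (some x) (by simp) (fun z hz => hall z (List.mem_cons_of_mem _ hz))

theorem pvInner_exists (h : String) : ∀ (tl : List String) (t : Option String),
    (∃ x ∈ tl, x ≠ h) → pvInner h tl t ≠ some h := by
  intro tl
  induction tl with
  | nil => intro t hex; simp at hex
  | cons x xs ih =>
    intro t hex
    by_cases hx : x = h
    · subst hx
      have hex' : ∃ y ∈ xs, y ≠ x := by
        rcases hex with ⟨y, hy, hne⟩
        rcases List.mem_cons.mp hy with rfl | hy'
        · exact absurd rfl hne
        · exact ⟨y, hy', hne⟩
      rw [pvInner_cons, if_neg (by simp)]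
      exact ih (some x) hex'
    · rw [pvInner_cons, if_pos (fun hh => hx hh.symm)]
      simpa using hx

theorem pvOuter_cons (h : String) (tl : List String) (rest : List (List String))
    (i : Nat) (t : Option String) :
    pvOuter ((h :: tl) :: rest) i t
      = if pvInner h tl t ≠ some h then i else pvOuter rest (i + 1) (pvInner h tl t) := rfl

theorem pvLead_cons (h : String) (tl : List String) (rest : List (List String)) :
    pvLead ((h :: tl) :: rest) = if tl.all (· == h) then pvLead rest + 1 else 0 := rfl

theorem pvOuter_lead : ∀ (cols : List (List String)) (i : Nat) (t : Option String),
    (∀ c ∈ cols, 2 ≤ c.length) → pvOuter cols i t = i + pvLead cols := by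
  intro cols
  induction cols with
  | nil => intro i t _; simp [pvOuter, pvLead]
  | cons col rest ih =>
    intro i t hlen
    have h2 : 2 ≤ col.length := hlen col (by simp)
    match col, h2 with
    | h :: x :: tl, _ =>
      by_cases hall : ∀ y ∈ x :: tl, y = h
      · have ht' : pvInner h (x :: tl) t = some h := pvInner_all h _ t (by simp) hall
        rw [pvOuter_cons, ht', if_neg (by simp)]
        rw [ih (i + 1) (some h) (fun c hc => hlen c (List.mem_cons_of_mem _ hc))]
        rw [pvLead_cons, if_pos (by simpa [List.all_eq_true] using hall)]
        omega
      · push_neg at hall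
        have ht' : pvInner h (x :: tl) t ≠ some h := pvInner_exists h _ t hall
        rw [pvOuter_cons, if_pos ht']
        rw [pvLead_cons, if_neg (by simp only [List.all_eq_true, beq_iff_eq]; push_neg; exact hall)]
        omega

theorem pvZip_lengths : ∀ (its : List (List String)) (c : List String),
    c ∈ pvZip its → c.length = its.length := by
  intro its
  induction its using pvZip.induct with
  | case1 its hc =>
    intro c hmem
    rw [pvZip, if_pos hc] at hmem
    simp at hmem
  | case2 its hc ih =>
    simp only [List.map_subtype, List.unattach_attach] at ih
    intro c hmem
    rw [pvZip, if_neg hc] at hmem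
    rcases List.mem_cons.mp hmem with rfl | hmem'
    · simp
    · rw [ih c hmem']; simp

-- ---- B's fold: |foldl pvCp| = number of leading uniform columns ----

theorem pvCp_nil (ys : List String) : pvCp [] ys = [] := by
  cases ys <;> simp [pvCp]

theorem pvFold_nil (rs : List (List String)) : rs.foldl pvCp [] = [] := by
  induction rs with
  | nil => rfl
  | cons r rs ih => simp [List.foldl_cons, pvCp_nil, ih]

theorem pvCp_prefix (xs : List String) : ∀ ys, pvCp xs ys <+: xs := by
  induction xs with
  | nil => intro ys; simp [pvCp_nil]
  | cons a as ih =>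
    intro ys
    cases ys with
    | nil => simp [pvCp]
    | cons b bs =>
      simp only [pvCp]
      by_cases hab : a = b
      · simp only [if_pos hab]
        exact List.cons_prefix_cons.mpr ⟨rfl, ih bs⟩
      · simp [if_neg hab]

theorem pvFold_prefix_acc (rs : List (List String)) : ∀ acc, rs.foldl pvCp acc <+: acc := by
  induction rs with
  | nil => intro acc; simp
  | cons r rs ih =>
    intro acc
    exact (ih (pvCp acc r)).trans (pvCp_prefix acc r)

theorem pvCp_prefix_right (xs : List String) : ∀ ys, pvCp xs ys <+: ys := by
  induction xs with
  | nil => intro ys; simp [pvCp_nil]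
  | cons a as ih =>
    intro ys
    cases ys with
    | nil => simp [pvCp]
    | cons b bs =>
      simp only [pvCp]
      by_cases hab : a = b
      · simp only [if_pos hab]
        rw [hab]
        exact List.cons_prefix_cons.mpr ⟨rfl, ih bs⟩
      · simp [if_neg hab]

theorem pvFold_prefix_mem (rs : List (List String)) : ∀ acc r, r ∈ rs → rs.foldl pvCp acc <+: r := by
  induction rs with
  | nil => intro acc r h; simp at h
  | cons s rs ih =>
    intro acc r h
    rcases List.mem_cons.mp h with rfl | h'
    · exact (pvFold_prefix_acc rs (pvCp acc r)).trans (pvCp_prefix_right acc r)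
    · exact ih (pvCp acc s) r h'

theorem pvFold_cons_heads (a : String) : ∀ (rest : List (List String)) (l0t : List String),
    (∀ r ∈ rest, ∃ rt, r = a :: rt) →
    rest.foldl pvCp (a :: l0t) = a :: (rest.map List.tail).foldl pvCp l0t := by
  intro rest
  induction rest with
  | nil => intro l0t _; simp
  | cons r rs ih =>
    intro l0t hh
    rcases hh r (by simp) with ⟨rt, rfl⟩
    simp only [List.foldl_cons, List.map_cons, List.tail_cons, pvCp, if_pos rfl]
    exact ih (pvCp l0t rt) (fun x hx => hh x (List.mem_cons_of_mem _ hx))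

theorem pvFold_kill (a : String) : ∀ (rest : List (List String)) (acc : List String),
    (acc = [] ∨ ∃ p, acc = a :: p) →
    (∃ r ∈ rest, r.head? ≠ some a) →
    rest.foldl pvCp acc = [] := by
  intro rest
  induction rest with
  | nil => intro acc _ hex; simp at hex
  | cons r rs ih =>
    intro acc hacc hex
    rcases hacc with rfl | ⟨p, rfl⟩
    · exact pvFold_nil (r :: rs)
    · by_cases hr : r.head? = some a
      · rcases r with _ | ⟨b, rt⟩
        · simp at hr
        · have hb : b = a := by simpa using hr
          subst hb
          have hex' : ∃ x ∈ rs, x.head? ≠ some b := by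
            rcases hex with ⟨x, hx, hne⟩
            rcases List.mem_cons.mp hx with rfl | hx'
            · exact absurd (by simp) hne
            · exact ⟨x, hx', hne⟩
          simp only [List.foldl_cons, pvCp, if_pos rfl]
          exact ih (b :: pvCp p rt) (Or.inr ⟨_, rfl⟩) hex'
      · have hcp : pvCp (a :: p) r = [] := by
          rcases r with _ | ⟨b, rt⟩
          · simp [pvCp]
          · have hba : ¬ b = a := by simpa using hr
            have hab : ¬ a = b := fun h => hba h.symm
            simp [pvCp, hab]
        simp only [List.foldl_cons, hcp]
        exact pvFold_nil rs

theorem pvLead_fold : ∀ (its : List (List String)) (l0 : List String) (rest : List (List String)),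
    its = l0 :: rest → pvLead (pvZip its) = (rest.foldl pvCp l0).length := by
  intro its
  induction its using pvZip.induct with
  | case1 its hc =>
    intro l0 rest heq
    subst heq
    rw [pvZip, if_pos hc]
    show 0 = (rest.foldl pvCp l0).length
    simp only [List.isEmpty_cons, Bool.false_or, List.any_eq_true,
      List.isEmpty_iff] at hc
    rcases hc with ⟨r, hr, hre⟩
    subst hre
    rcases List.mem_cons.mp hr with rfl | hr'
    · rw [pvFold_nil]; rfl
    · have := pvFold_prefix_mem rest l0 [] hr'
      rw [List.prefix_nil.mp this]
      rfl
  | case2 its hc ih =>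
    simp only [List.map_subtype, List.unattach_attach] at ih
    intro l0 rest heq
    subst heq
    rw [pvZip, if_neg hc]
    simp only [List.isEmpty_cons, Bool.false_or, Bool.or_eq_true, List.any_eq_true,
      List.isEmpty_iff] at hc
    push_neg at hc
    have hne : ∀ r ∈ l0 :: rest, r ≠ [] := hc
    rcases hl0 : l0 with _ | ⟨a, l0t⟩
    · exact absurd hl0 (hne l0 (by simp))
    · subst hl0
      simp only [List.map_cons, List.headD_cons, List.tail_cons]
      by_cases hall : ∀ r ∈ rest, r.headD "" = a
      · have hheads : ∀ r ∈ rest, ∃ rt, r = a :: rt := by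
          intro r hr
          rcases r with _ | ⟨b, rt⟩
          · exact absurd rfl (hne [] (List.mem_cons_of_mem _ hr))
          · exact ⟨rt, by rw [show b = a from by simpa using hall _ hr]⟩
        rw [pvLead_cons, if_pos ?hcond]
        case hcond =>
          simp only [List.all_eq_true, beq_iff_eq]
          intro y hy
          simp only [List.mem_map] at hy
          rcases hy with ⟨r, hr, rfl⟩
          exact hall r hr
        have ih' := ih l0t (rest.map List.tail) (by simp)
        simp only [List.map_cons, List.tail_cons] at ih'
        rw [ih']
        rw [pvFold_cons_heads a rest l0t hheads]
        rfl
      · push_neg at hall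
        rcases hall with ⟨r, hr, hrne⟩
        rw [pvLead_cons, if_neg ?hcond]
        case hcond =>
          simp only [List.all_eq_true, beq_iff_eq]
          push_neg
          exact ⟨r.headD "", List.mem_map_of_mem hr, hrne⟩
        have hhead : r.head? ≠ some a := by
          rcases r with _ | ⟨b, rt⟩
          · exact absurd rfl (hne [] (List.mem_cons_of_mem _ hr))
          · simpa using fun hba => hrne (by simpa using hba)
        rw [pvFold_kill a rest (a :: l0t) (Or.inr ⟨_, rfl⟩) ⟨r, hr, hhead⟩]
        rfl

-- ---- assembling the three arities ----

theorem shorten_eq (filenames : List String) :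
    shorten_filenames filenames = shorten_filenames_alt filenames := by
  match filenames with
  | [] => rfl
  | [f] =>
    show ([f].map pvSplit).map (fun t => PySem.Str.join "/" (t.drop (pvOuter (pvZip ([f].map pvSplit)) 0 none))) = [f]
    have hi : pvOuter (pvZip [pvSplit f]) 0 none = 0 := by
      rw [pvZip]
      by_cases he : (pvSplit f).isEmpty
      · simp [he, pvOuter]
      · rw [if_neg (by simp [he])]
        rcases hsp : pvSplit f with _ | ⟨a, tl⟩
        · rw [hsp] at he; simp at he
        · simp only [List.map_cons, List.map_nil, List.headD_cons]
          rw [pvOuter_cons]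
          rw [if_pos (by simp [pvInner])]
    simp only [List.map_cons, List.map_nil] at hi ⊢
    rw [hi]
    simp only [List.drop_zero]
    rw [pv_join_split f]
  | f0 :: f1 :: fs =>
    have hlen : ¬ (f0 :: f1 :: fs).length < 2 := by simp
    rcases hmap : (f0 :: f1 :: fs).map pvSplit with _ | ⟨l0, rest⟩
    · simp at hmap
    · have hcols : ∀ c ∈ pvZip ((f0 :: f1 :: fs).map pvSplit), 2 ≤ c.length := by
        intro c hc
        rw [pvZip_lengths _ c hc]
        simp
      have hA : pvOuter (pvZip ((f0 :: f1 :: fs).map pvSplit)) 0 none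
          = (rest.foldl pvCp l0).length := by
        rw [pvOuter_lead _ 0 none hcols, Nat.zero_add]
        rw [hmap]
        exact pvLead_fold (l0 :: rest) l0 rest rfl
      show ((f0 :: f1 :: fs).map pvSplit).map
          (fun t => PySem.Str.join "/" (t.drop (pvOuter (pvZip ((f0 :: f1 :: fs).map pvSplit)) 0 none)))
        = shorten_filenames_alt (f0 :: f1 :: fs)
      rw [hA, hmap]
      simp only [shorten_filenames_alt, if_neg hlen, hmap]

-- ===== VERDICT (by name: the statement is the Claim_ definition above) =====
theorem shorten_filenames_spec : Claim_equal_shorten_filenames := by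
  intro filenames _
  show _ = _
  exact shorten_eq filenames
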